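-- pv_equiv track=rewrite | github.com/Bart3Kn/Software-Refactor-Predictive-AI | MDGClustering.py | EVMFitness
-- ===== SOURCE A (Python) =====
-- def EVMFitness(currentSolution,mdg):
--
--     EVM = 0
--
--     for j in range(0,len(mdg[0])-1):
--         for k in range(1,len(mdg[0])):
--             C1 = currentSolution[j]
--             C2 = currentSolution[k]
--
--             # COMPARES NEARBY OBJECTS IN SOLUTION IF THEY ARE THE SAME GROUP THEN
--             if C1 == C2:
--
--                 # CHANGES EVM VALUE
--                 # IF THE MATRIX VALUES ARE THE SAME WE GET A VALUE OF 1
--                 EVM = EVM + (2*mdg[j][k])-1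
--     return EVM
-- ===== SOURCE B (Python) =====
-- def EVMFitness(currentSolution, mdg):
--     # Group indices by cluster value, then sum over the grouped cross products
--     # instead of testing every (j, k) pair for equality.
--     m = len(mdg[0])
--     jmap = {}
--     for j in range(0, m - 1):
--         jmap.setdefault(currentSolution[j], []).append(j)
--     kmap = {}
--     for k in range(1, m):
--         kmap.setdefault(currentSolution[k], []).append(k)
--     total = 0
--     for c, js in jmap.items():
--         ks = kmap.get(c, [])
--         for j in js:
--             for k in ks:
--                 total += 2 * mdg[j][k] - 1
--     return total
-- ===== Notes on version B (the rewrite author's own statement) =====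
-- stated objective: alternative
-- what changed: B replaces the per-pair equality test of the nested j/k loops by two dicts grouping indices by cluster value and sums the term over the grouped cross products per cluster.
import Mathlib
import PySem

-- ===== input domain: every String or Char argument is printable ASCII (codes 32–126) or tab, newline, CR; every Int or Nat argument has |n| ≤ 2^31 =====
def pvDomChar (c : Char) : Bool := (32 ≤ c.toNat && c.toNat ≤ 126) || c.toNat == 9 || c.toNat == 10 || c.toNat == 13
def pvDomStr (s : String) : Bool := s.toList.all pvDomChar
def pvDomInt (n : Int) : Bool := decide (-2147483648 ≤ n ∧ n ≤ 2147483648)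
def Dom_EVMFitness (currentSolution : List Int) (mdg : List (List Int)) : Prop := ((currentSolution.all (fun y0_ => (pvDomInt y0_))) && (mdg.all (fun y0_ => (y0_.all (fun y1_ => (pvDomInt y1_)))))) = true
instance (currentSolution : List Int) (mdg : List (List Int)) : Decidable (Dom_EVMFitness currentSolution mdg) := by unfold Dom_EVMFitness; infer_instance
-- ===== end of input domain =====

-- B groups indices by cluster value in two dicts and sums over the grouped cross
-- products per cluster instead of testing every (j, k) pair for equality.

-- ===== PORT A =====
def EVMFitness (currentSolution : List Int) (mdg : List (List Int)) : Int :=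
  (PySem.List.pyRange 0 (((PySem.List.pyGetD mdg 0 []).length : Int) - 1) 1).foldl (fun EVM j =>
    (PySem.List.pyRange 1 ((PySem.List.pyGetD mdg 0 []).length : Int) 1).foldl (fun EVM k =>
      let C1 := PySem.List.pyGetD currentSolution j 0
      let C2 := PySem.List.pyGetD currentSolution k 0
      if C1 = C2 then
        EVM + 2 * PySem.List.pyGetD (PySem.List.pyGetD mdg j []) k 0 - 1
      else EVM) EVM) 0

-- ===== PORT B =====
def EVMFitness_alt (currentSolution : List Int) (mdg : List (List Int)) : Int :=
  let m : Int := ((PySem.List.pyGetD mdg 0 []).length : Int)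
  let jmap : PySem.Dict Int (List Int) :=
    (PySem.List.pyRange 0 (m - 1) 1).foldl
      (fun d j => d.modify (PySem.List.pyGetD currentSolution j 0) [] (· ++ [j]))
      PySem.Dict.empty
  let kmap : PySem.Dict Int (List Int) :=
    (PySem.List.pyRange 1 m 1).foldl
      (fun d k => d.modify (PySem.List.pyGetD currentSolution k 0) [] (· ++ [k]))
      PySem.Dict.empty
  jmap.items.foldl (fun total p =>
    let ks := kmap.getD p.1 []
    p.2.foldl (fun total j =>
      ks.foldl (fun total k =>
        total + 2 * PySem.List.pyGetD (PySem.List.pyGetD mdg j []) k 0 - 1) total) total) 0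

-- ===== PRECONDITION & SPEC =====
-- Pre_ holds exactly where the Python A returns: mdg nonempty (len(mdg[0])),
-- currentSolution long enough for the index loops, and every same-cluster pair
-- (j, k) in range within the bounds of mdg.
def Pre_EVMFitness (currentSolution : List Int) (mdg : List (List Int)) : Prop :=
  mdg ≠ [] ∧
  (2 ≤ (mdg.headI).length → (mdg.headI).length ≤ currentSolution.length) ∧
  (∀ j < (mdg.headI).length - 1, ∀ k < (mdg.headI).length, 1 ≤ k →
    currentSolution.getD j 0 = currentSolution.getD k 0 →
    j < mdg.length ∧ k < (mdg.getD j []).length)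
instance (currentSolution : List Int) (mdg : List (List Int)) : Decidable (Pre_EVMFitness currentSolution mdg) := by
  unfold Pre_EVMFitness; infer_instance

def pvWitness_EVMFitness : List Int × List (List Int) := ([1, 1], [[0, 5], [9, 9]])

def Spec_EVMFitness (currentSolution : List Int) (mdg : List (List Int)) (out : Int) : Prop := out = EVMFitness_alt currentSolution mdg
instance (currentSolution : List Int) (mdg : List (List Int)) (out : Int) : Decidable (Spec_EVMFitness currentSolution mdg out) := by unfold Spec_EVMFitness; infer_instance

-- ===== CLAIM (what is proved, stated in full; the proofs are below) =====
def Claim_equal_EVMFitness : Prop := ∀ (currentSolution : List Int) (mdg : List (List Int)), Dom_EVMFitness currentSolution mdg → Pre_EVMFitness currentSolution mdg → Spec_EVMFitness currentSolution mdg (EVMFitness currentSolution mdg)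

-- ===== LEMMAS AND PROOFS =====

-- the summed term
def pvT (mdg : List (List Int)) (j k : Int) : Int :=
  2 * PySem.List.pyGetD (PySem.List.pyGetD mdg j []) k 0 - 1

-- Σ_{v∈C} (if v = a then x else 0) = x when a occurs exactly once in C
lemma pv_sum_ite_mem (C : List Int) (a : Int) (x : Int) (h : a ∈ C) (hnd : C.Nodup) :
    (C.map (fun v => if v = a then x else 0)).sum = x := by
  induction C with
  | nil => cases h
  | cons b C ih =>
    rcases List.nodup_cons.mp hnd with ⟨hb, hnd'⟩
    rcases List.mem_cons.mp h with h | h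
    · subst h
      have hz : (C.map (fun v => if v = a then x else 0)).sum = 0 := by
        apply List.sum_eq_zero; intro y hy
        rcases List.mem_map.mp hy with ⟨v, hv, rfl⟩
        have : v ≠ a := fun hva => hb (hva ▸ hv)
        simp [this]
      simp [hz]
    · have hba : b ≠ a := fun hba => hb (hba ▸ h)
      simp only [List.map_cons, List.sum_cons, if_neg hba, zero_add]
      exact ih h hnd'

-- partition of a sum over L by the (Nodup, covering) list C of cluster values
lemma pv_partition_sum (L : List Int) (c : Int → Int) (F : Int → Int) (C : List Int)
    (hnd : C.Nodup) (hmem : ∀ j ∈ L, c j ∈ C) :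
    (C.map (fun v => ((L.filter (fun j => c j == v)).map F).sum)).sum = (L.map F).sum := by
  induction L with
  | nil => simp
  | cons j L ih =>
    have hmem' : ∀ x ∈ L, c x ∈ C := fun x hx => hmem x (List.mem_cons_of_mem _ hx)
    have step : ∀ v : Int,
        ((((j :: L).filter (fun i => c i == v)).map F).sum)
          = (if v = c j then F j else 0) + ((L.filter (fun i => c i == v)).map F).sum := by
      intro v
      by_cases hv : c j = v
      · simp [hv]
      · have hb : (c j == v) = false := by simp [hv]
        have hv' : v ≠ c j := fun h => hv h.symm
        simp [hb, hv']
    calc (C.map (fun v => (((j :: L).filter (fun i => c i == v)).map F).sum)).sum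
        = (C.map (fun v => (if v = c j then F j else 0)
            + ((L.filter (fun i => c i == v)).map F).sum)).sum := by
          simp only [step]
      _ = (C.map (fun v => if v = c j then F j else 0)).sum
            + (C.map (fun v => ((L.filter (fun i => c i == v)).map F).sum)).sum := by
          rw [← List.sum_map_add]
      _ = F j + (L.map F).sum := by
          rw [pv_sum_ite_mem C (c j) (F j) (hmem j (List.mem_cons_self)) hnd, ih hmem']
      _ = ((j :: L).map F).sum := by simp


-- cluster value of index i
def pvC (cs : List Int) (i : Int) : Int := PySem.List.pyGetD cs i 0

-- A as a double sum with an `if` over the unfiltered ranges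
lemma pv_A_eq (cs : List Int) (mdg : List (List Int)) :
    EVMFitness cs mdg =
      ((PySem.List.pyRange 0 (((PySem.List.pyGetD mdg 0 []).length : Int) - 1) 1).map (fun j =>
        ((PySem.List.pyRange 1 ((PySem.List.pyGetD mdg 0 []).length : Int) 1).map (fun k =>
          if pvC cs j = pvC cs k then pvT mdg j k else 0)).sum)).sum := by
  unfold EVMFitness
  have hinner : ∀ (j a : Int),
      (PySem.List.pyRange 1 ((PySem.List.pyGetD mdg 0 []).length : Int) 1).foldl (fun EVM k =>
        let C1 := PySem.List.pyGetD cs j 0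
        let C2 := PySem.List.pyGetD cs k 0
        if C1 = C2 then
          EVM + 2 * PySem.List.pyGetD (PySem.List.pyGetD mdg j []) k 0 - 1
        else EVM) a
      = a + ((PySem.List.pyRange 1 ((PySem.List.pyGetD mdg 0 []).length : Int) 1).map (fun k =>
          if pvC cs j = pvC cs k then pvT mdg j k else 0)).sum := by
    intro j a
    rw [show (fun EVM k =>
        let C1 := PySem.List.pyGetD cs j 0
        let C2 := PySem.List.pyGetD cs k 0
        if C1 = C2 then
          EVM + 2 * PySem.List.pyGetD (PySem.List.pyGetD mdg j []) k 0 - 1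
        else EVM)
      = (fun (EVM : Int) (k : Int) => EVM + (if pvC cs j = pvC cs k then pvT mdg j k else 0)) from by
        funext EVM k
        simp only [pvC, pvT]
        by_cases h : PySem.List.pyGetD cs j 0 = PySem.List.pyGetD cs k 0
        · simp only [if_pos h]; ring
        · simp only [if_neg h, add_zero]]
    exact PySem.List.foldl_add _ _ a
  calc (PySem.List.pyRange 0 (((PySem.List.pyGetD mdg 0 []).length : Int) - 1) 1).foldl _ 0
      = (PySem.List.pyRange 0 (((PySem.List.pyGetD mdg 0 []).length : Int) - 1) 1).foldl
          (fun EVM j => EVM + ((PySem.List.pyRange 1 ((PySem.List.pyGetD mdg 0 []).length : Int) 1).map (fun k =>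
            if pvC cs j = pvC cs k then pvT mdg j k else 0)).sum) 0 := by
        congr 1; funext EVM j; exact hinner j EVM
    _ = _ := by rw [PySem.List.foldl_add]; simp

-- the grouping loop's dict: lookup is a filter of the looped-over index list
lemma pv_group_getD (cs : List Int) (L : List Int) (v : Int) :
    ((L.foldl (fun d j => d.modify (PySem.List.pyGetD cs j 0) [] (· ++ [j]))
        (PySem.Dict.empty : PySem.Dict Int (List Int))).getD v [])
      = L.filter (fun j => pvC cs j == v) := by
  rw [show (List.foldl (fun d j => d.modify (PySem.List.pyGetD cs j 0) [] (· ++ [j]))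
        (PySem.Dict.empty : PySem.Dict Int (List Int)) L)
      = (List.foldl (fun (d : PySem.Dict Int (List Int)) (p : Int × Int) => d.modify p.1 [] (· ++ [p.2]))
          PySem.Dict.empty (L.map (fun j => (PySem.List.pyGetD cs j 0, j)))) from
    (List.foldl_map (f := fun j => (PySem.List.pyGetD cs j 0, j))
      (g := fun (d : PySem.Dict Int (List Int)) (p : Int × Int) => d.modify p.1 [] (· ++ [p.2]))
      (l := L) (init := PySem.Dict.empty)).symm]
  rw [PySem.Dict.getD_foldl_modify_append]
  simp [List.filter_map, Function.comp_def, pvC]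

-- the grouping loop's dict: keys are the distinct cluster values in order
lemma pv_group_keys (cs : List Int) (L : List Int) :
    ((L.foldl (fun d j => d.modify (PySem.List.pyGetD cs j 0) [] (· ++ [j]))
        (PySem.Dict.empty : PySem.Dict Int (List Int))).keys)
      = PySem.Set.ofList (L.map (pvC cs)) := by
  rw [PySem.Dict.keys_foldl_modify_key L (fun j => PySem.List.pyGetD cs j 0) []
        (fun _ j => (· ++ [j])) PySem.Dict.empty]
  rw [PySem.Dict.keys_empty]
  rfl

lemma pv_group_nodup (cs : List Int) (L : List Int) :
    ((L.foldl (fun d j => d.modify (PySem.List.pyGetD cs j 0) [] (· ++ [j]))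
        (PySem.Dict.empty : PySem.Dict Int (List Int))).keys).Nodup := by
  apply PySem.Dict.nodup_keys_foldl_modify_key L (fun j => PySem.List.pyGetD cs j 0) []
        (fun _ j => (· ++ [j])) PySem.Dict.empty
  simp [PySem.Dict.keys_empty]

-- B as a grouped triple sum
lemma pv_B_eq (cs : List Int) (mdg : List (List Int)) :
    EVMFitness_alt cs mdg =
      ((PySem.Set.ofList ((PySem.List.pyRange 0 (((PySem.List.pyGetD mdg 0 []).length : Int) - 1) 1).map (pvC cs)) : List Int).map (fun v =>
        (((PySem.List.pyRange 0 (((PySem.List.pyGetD mdg 0 []).length : Int) - 1) 1).filter (fun j => pvC cs j == v)).map (fun j =>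
          (((PySem.List.pyRange 1 ((PySem.List.pyGetD mdg 0 []).length : Int) 1).filter (fun k => pvC cs k == v)).map (fun k =>
            pvT mdg j k)).sum)).sum)).sum := by
  unfold EVMFitness_alt
  simp only []
  rw [PySem.Dict.items_eq_map_keys _ (pv_group_nodup cs _) []]
  rw [List.foldl_map]
  rw [pv_group_keys]
  have hinner3 : ∀ (j t0 : Int) (ks : List Int),
      ks.foldl (fun total k => total + 2 * PySem.List.pyGetD (PySem.List.pyGetD mdg j []) k 0 - 1) t0
        = t0 + (ks.map (fun k => pvT mdg j k)).sum := by
    intro j t0 ks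
    rw [show (fun (total k : Int) => total + 2 * PySem.List.pyGetD (PySem.List.pyGetD mdg j []) k 0 - 1)
        = (fun (total k : Int) => total + pvT mdg j k) from by
      funext t k; simp only [pvT]; ring]
    exact PySem.List.foldl_add _ _ _
  have hbody : ∀ (total v : Int),
      ((((PySem.List.pyRange 0 (((PySem.List.pyGetD mdg 0 []).length : Int) - 1) 1).foldl
          (fun d j => d.modify (PySem.List.pyGetD cs j 0) [] (· ++ [j])) PySem.Dict.empty).getD v []).foldl
        (fun total j =>
          (((PySem.List.pyRange 1 ((PySem.List.pyGetD mdg 0 []).length : Int) 1).foldl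
              (fun d k => d.modify (PySem.List.pyGetD cs k 0) [] (· ++ [k])) PySem.Dict.empty).getD v []).foldl
            (fun total k => total + 2 * PySem.List.pyGetD (PySem.List.pyGetD mdg j []) k 0 - 1) total) total)
      = total + (((PySem.List.pyRange 0 (((PySem.List.pyGetD mdg 0 []).length : Int) - 1) 1).filter (fun j => pvC cs j == v)).map (fun j =>
          (((PySem.List.pyRange 1 ((PySem.List.pyGetD mdg 0 []).length : Int) 1).filter (fun k => pvC cs k == v)).map (fun k =>
            pvT mdg j k)).sum)).sum := by
    intro total v
    rw [pv_group_getD, pv_group_getD]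
    rw [show (fun (total j : Int) =>
        ((PySem.List.pyRange 1 ((PySem.List.pyGetD mdg 0 []).length : Int) 1).filter (fun k => pvC cs k == v)).foldl
          (fun total k => total + 2 * PySem.List.pyGetD (PySem.List.pyGetD mdg j []) k 0 - 1) total)
      = (fun (total j : Int) => total +
          (((PySem.List.pyRange 1 ((PySem.List.pyGetD mdg 0 []).length : Int) 1).filter (fun k => pvC cs k == v)).map (fun k =>
            pvT mdg j k)).sum) from by
      funext t j; exact hinner3 j t _]
    exact PySem.List.foldl_add _ _ _
  calc _ = ((PySem.Set.ofList ((PySem.List.pyRange 0 (((PySem.List.pyGetD mdg 0 []).length : Int) - 1) 1).map (pvC cs)) : List Int).foldl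
        (fun total v => total + (((PySem.List.pyRange 0 (((PySem.List.pyGetD mdg 0 []).length : Int) - 1) 1).filter (fun j => pvC cs j == v)).map (fun j =>
          (((PySem.List.pyRange 1 ((PySem.List.pyGetD mdg 0 []).length : Int) 1).filter (fun k => pvC cs k == v)).map (fun k =>
            pvT mdg j k)).sum)).sum) 0) := by
        congr 1; funext total v; exact hbody total v
    _ = _ := by rw [PySem.List.foldl_add]; simp

-- the `if` over the full k-range is the sum over the matching k-indices
lemma pv_if_sum (cs : List Int) (mdg : List (List Int)) (j : Int) (K : List Int) :
    (K.map (fun k => if pvC cs j = pvC cs k then pvT mdg j k else 0)).sum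
      = ((K.filter (fun k => pvC cs k == pvC cs j)).map (fun k => pvT mdg j k)).sum := by
  rw [List.sum_map_ite (fun k => pvC cs j = pvC cs k) (fun k => pvT mdg j k) (fun _ => 0) K]
  have hp : (fun k => decide (pvC cs j = pvC cs k)) = (fun k => pvC cs k == pvC cs j) := by
    funext k
    by_cases h : pvC cs j = pvC cs k
    · rw [h]; simp
    · have h2 : pvC cs k ≠ pvC cs j := fun e => h e.symm
      simp [h, h2]
  rw [hp]
  simp

-- ===== VERDICT (by name: the statement is the Claim_ definition above) =====
theorem EVMFitness_spec : Claim_equal_EVMFitness := by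
  intro cs mdg _ _
  unfold Spec_EVMFitness
  rw [pv_A_eq, pv_B_eq]
  rw [show (fun j => ((PySem.List.pyRange 1 ((PySem.List.pyGetD mdg 0 []).length : Int) 1).map (fun k =>
        if pvC cs j = pvC cs k then pvT mdg j k else 0)).sum)
      = (fun j => (((PySem.List.pyRange 1 ((PySem.List.pyGetD mdg 0 []).length : Int) 1).filter (fun k =>
          pvC cs k == pvC cs j)).map (fun k => pvT mdg j k)).sum) from
    funext fun j => pv_if_sum cs mdg j _]
  have hRHS : ((PySem.Set.ofList ((PySem.List.pyRange 0 (((PySem.List.pyGetD mdg 0 []).length : Int) - 1) 1).map (pvC cs)) : List Int).map (fun v =>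
        (((PySem.List.pyRange 0 (((PySem.List.pyGetD mdg 0 []).length : Int) - 1) 1).filter (fun j => pvC cs j == v)).map (fun j =>
          (((PySem.List.pyRange 1 ((PySem.List.pyGetD mdg 0 []).length : Int) 1).filter (fun k => pvC cs k == v)).map (fun k =>
            pvT mdg j k)).sum)).sum)).sum
      = ((PySem.Set.ofList ((PySem.List.pyRange 0 (((PySem.List.pyGetD mdg 0 []).length : Int) - 1) 1).map (pvC cs)) : List Int).map (fun v =>
        (((PySem.List.pyRange 0 (((PySem.List.pyGetD mdg 0 []).length : Int) - 1) 1).filter (fun j => pvC cs j == v)).map (fun j =>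
          (((PySem.List.pyRange 1 ((PySem.List.pyGetD mdg 0 []).length : Int) 1).filter (fun k => pvC cs k == pvC cs j)).map (fun k =>
            pvT mdg j k)).sum)).sum)).sum := by
    apply congrArg List.sum
    apply List.map_congr_left
    intro v _
    apply congrArg List.sum
    apply List.map_congr_left
    intro j hj
    have hcv : pvC cs j = v := by
      have := (List.mem_filter.mp hj).2
      simpa using this
    rw [hcv]
  rw [hRHS]
  exact (pv_partition_sum
    (PySem.List.pyRange 0 (((PySem.List.pyGetD mdg 0 []).length : Int) - 1) 1) (pvC cs)
    (fun j => (((PySem.List.pyRange 1 ((PySem.List.pyGetD mdg 0 []).length : Int) 1).filter (fun k =>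
      pvC cs k == pvC cs j)).map (fun k => pvT mdg j k)).sum)
    (PySem.Set.ofList ((PySem.List.pyRange 0 (((PySem.List.pyGetD mdg 0 []).length : Int) - 1) 1).map (pvC cs)))
    (PySem.Set.nodup_ofList _)
    (fun j hj => (PySem.Set.mem_ofList _ _).mpr (List.mem_map_of_mem hj))).symm
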